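-- pv_equiv track=rewrite | github.com/ChamsFares/Opportunity_Detetion_AI_platform | backend/services/web_scraper.py | _is_relevant_content
-- ===== SOURCE A (Python) =====
-- from typing import Dict, List, Optional, Any
--
-- def _is_relevant_content(
--     text_content: str, target_fields: Dict[str, List[str]]
-- ) -> List[str]:
--     """
--     Check if content is relevant based on target fields.
--
--     Args:
--         text_content: Text content to check
--         target_fields: Dictionary of target fields and their keywords
--
--     Returns:
--         List of relevant field names
--     """
--     relevant_fields = []
--     text_content_lower = text_content.lower()
--
--     for field, keywords in target_fields.items():
--         if any(keyword.lower() in text_content_lower for keyword in keywords):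
--             relevant_fields.append(field)
--
--     return relevant_fields
-- ===== SOURCE B (Python) =====
-- def _is_relevant_content(text_content, target_fields):
--     text_content_lower = text_content.lower()
--     items = list(target_fields.items())
--     # inverted index: lowered keyword -> indices of the fields that want it
--     pairs = [(kw.lower(), i) for i, (_field, kws) in enumerate(items) for kw in kws]
--     wanted = {}
--     for k, i in pairs:
--         wanted.setdefault(k, []).append(i)
--     # one substring test per distinct keyword; skip keywords whose fields are all hit already
--     hit = [False] * len(items)
--     for k, idxs in wanted.items():
--         if not all(hit[i] for i in idxs) and k in text_content_lower:
--             for i in idxs: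
--                 hit[i] = True
--     return [field for (field, _kws), h in zip(items, hit) if h]
-- ===== Notes on version B (the rewrite author's own statement) =====
-- stated objective: faster
-- what changed: B builds an inverted index from lowered keyword to field indices, runs at most one substring search per distinct keyword (skipping keywords all of whose fields are already marked), then emits fields from the resulting hit mask, instead of A's per-field inner scan that re-lowers and re-searches every keyword occurrence.
import Mathlib
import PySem

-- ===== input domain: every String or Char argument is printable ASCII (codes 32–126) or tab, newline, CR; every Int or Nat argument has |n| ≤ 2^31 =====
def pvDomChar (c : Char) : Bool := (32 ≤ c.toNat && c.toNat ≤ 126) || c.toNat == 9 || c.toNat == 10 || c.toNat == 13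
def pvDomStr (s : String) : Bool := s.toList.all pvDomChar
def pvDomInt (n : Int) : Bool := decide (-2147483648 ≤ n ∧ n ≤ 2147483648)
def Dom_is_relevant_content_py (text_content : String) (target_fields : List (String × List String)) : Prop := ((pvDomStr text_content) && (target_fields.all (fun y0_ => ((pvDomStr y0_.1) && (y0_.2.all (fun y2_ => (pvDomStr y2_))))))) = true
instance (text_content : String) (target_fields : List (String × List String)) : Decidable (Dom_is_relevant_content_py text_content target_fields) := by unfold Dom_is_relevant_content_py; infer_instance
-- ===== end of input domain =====

-- B replaces A's per-field re-scanning by an inverted index (lowered keyword -> field indices): one substring test per distinct keyword, skipped when all its fields are already hit; same return value.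


-- ===== PORT A =====
-- relevant_fields = []; for field, keywords in items: if any(kw.lower() in text_lower): append(field)
def is_relevant_content_py (text_content : String) (target_fields : List (String × List String)) : List String :=
  let text_content_lower := PySem.Str.lower text_content
  target_fields.foldl
    (fun relevant_fields fk =>
      if fk.2.any (fun keyword => PySem.Str.isIn (PySem.Str.lower keyword) text_content_lower)
      then relevant_fields ++ [fk.1] else relevant_fields)
    []

-- ===== PORT B =====
-- pairs = [(kw.lower(), i) for i, (_field, kws) in enumerate(items) for kw in kws]
def pvPairs (target_fields : List (String × List String)) : List (String × Int) :=
  (PySem.List.enumerate target_fields 0).flatMap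
    (fun p => p.2.2.map (fun kw => (PySem.Str.lower kw, p.1)))

-- wanted = {}; for k, i in pairs: wanted.setdefault(k, []).append(i)
def pvWanted (target_fields : List (String × List String)) : PySem.Dict String (List Int) :=
  (pvPairs target_fields).foldl
    (fun d p => PySem.Dict.modify d p.1 [] (· ++ [p.2])) PySem.Dict.empty

-- for i in idxs: hit[i] = True
def pvMarkAll (hit : List Bool) (idxs : List Int) : List Bool :=
  idxs.foldl (fun h i => h.set i.toNat true) hit

-- if not all(hit[i] for i in idxs) and k in text: mark all idxs
def pvHitStep (t : String) (hit : List Bool) (q : String × List Int) : List Bool :=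
  if q.2.all (fun i => PySem.List.pyGetD hit i false) then hit
  else if PySem.Str.isIn q.1 t then pvMarkAll hit q.2
  else hit

def is_relevant_content_py_alt (text_content : String) (target_fields : List (String × List String)) : List String :=
  let text_content_lower := PySem.Str.lower text_content
  let wanted := pvWanted target_fields
  let hit := (PySem.Dict.items wanted).foldl (pvHitStep text_content_lower)
    (List.replicate target_fields.length false)
  ((target_fields.zip hit).filter (fun q => q.2)).map (fun q => q.1.1)

-- ===== PRECONDITION & SPEC =====
def Spec_is_relevant_content_py (text_content : String) (target_fields : List (String × List String)) (out : List String) : Prop := out = is_relevant_content_py_alt text_content target_fields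
instance (text_content : String) (target_fields : List (String × List String)) (out : List String) : Decidable (Spec_is_relevant_content_py text_content target_fields out) := by unfold Spec_is_relevant_content_py; infer_instance

-- ===== CLAIM (what is proved, stated in full; the proofs are below) =====
def Claim_equal_is_relevant_content_py : Prop := ∀ (text_content : String) (target_fields : List (String × List String)), Dom_is_relevant_content_py text_content target_fields → Spec_is_relevant_content_py text_content target_fields (is_relevant_content_py text_content target_fields)

-- ===== LEMMAS AND PROOFS =====

-- membership in the pairs list
theorem mem_pvPairs (tf : List (String × List String)) (k : String) (x : Int) :
    (k, x) ∈ pvPairs tf ↔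
      ∃ (j : Nat) (hj : j < tf.length), x = (j : Int) ∧ ∃ kw ∈ tf[j].2, k = PySem.Str.lower kw := by
  unfold pvPairs
  simp only [List.mem_flatMap, PySem.List.mem_enumerate_iff, List.mem_map]
  constructor
  · rintro ⟨p, ⟨j, hj, rfl⟩, kw, hkw, hEq⟩
    injection hEq with h1 h2
    exact ⟨j, hj, by simpa using h2.symm, kw, by simpa using hkw, h1.symm⟩
  · rintro ⟨j, hj, rfl, kw, hkw, rfl⟩
    exact ⟨(0 + (j : Int), tf[j]), ⟨j, hj, rfl⟩, kw, hkw, by simp⟩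

theorem pvWanted_nodup_keys (tf : List (String × List String)) : (pvWanted tf).keys.Nodup := by
  unfold pvWanted
  exact PySem.Dict.nodup_keys_foldl_modify_key (pvPairs tf) Prod.fst []
    (fun _ p => (· ++ [p.2])) PySem.Dict.empty PySem.Dict.nodup_keys_empty

theorem pvWanted_getD (tf : List (String × List String)) (k : String) :
    (pvWanted tf).getD k [] = ((pvPairs tf).filter (fun p => p.1 == k)).map (·.2) := by
  unfold pvWanted
  rw [PySem.Dict.getD_foldl_modify_append]
  simp [PySem.Dict.getD_empty]

theorem pvWanted_keys (tf : List (String × List String)) :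
    (pvWanted tf).keys = PySem.Set.ofList ((pvPairs tf).map (·.1)) := by
  unfold pvWanted
  rw [PySem.Dict.keys_foldl_modify_key]
  simp [PySem.Dict.keys_empty, PySem.Set.update, PySem.Set.ofList]

-- marking loop: hit[j] afterwards is hit[j] or (j in idxs)
theorem pvMarkAll_spec (idxs : List Int) (hpos : ∀ i ∈ idxs, 0 ≤ i) (hit : List Bool) :
    (pvMarkAll hit idxs).length = hit.length ∧
    ∀ j : Nat, j < hit.length →
      (pvMarkAll hit idxs).getD j false = (hit.getD j false || decide ((j : Int) ∈ idxs)) := by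
  induction idxs generalizing hit with
  | nil => simp [pvMarkAll]
  | cons i rest ih =>
    have h0 : (0 : Int) ≤ i := hpos i (by simp)
    obtain ⟨hl, hg⟩ := ih (fun x hx => hpos x (List.mem_cons_of_mem _ hx)) (hit.set i.toNat true)
    refine ⟨by simpa [pvMarkAll] using hl, ?_⟩
    intro j hj
    have : (pvMarkAll hit (i :: rest)) = pvMarkAll (hit.set i.toNat true) rest := by
      simp [pvMarkAll]
    rw [this, hg j (by simpa using hj)]
    by_cases hij : (j : Int) = i
    · have hnat : i.toNat = j := by omega
      simp [List.getD_eq_getElem?_getD, hnat, hj, hij]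
    · have hnat : i.toNat ≠ j := by omega
      simp [List.getD_eq_getElem?_getD, hnat, hij]

-- hit loop invariant
theorem pvHitFold_spec (t : String) (ps : List (String × List Int)) (hit : List Bool)
    (hpos : ∀ q ∈ ps, ∀ i ∈ q.2, 0 ≤ i) :
    (ps.foldl (pvHitStep t) hit).length = hit.length ∧
    ∀ j : Nat, j < hit.length →
      (ps.foldl (pvHitStep t) hit).getD j false
        = (hit.getD j false ||
            decide (∃ q ∈ ps, (j : Int) ∈ q.2 ∧ PySem.Str.isIn q.1 t = true)) := by
  induction ps generalizing hit with
  | nil => simp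
  | cons q rest ih =>
    have hposq : ∀ i ∈ q.2, 0 ≤ i := hpos q (by simp)
    have hposr : ∀ q' ∈ rest, ∀ i ∈ q'.2, 0 ≤ i := fun q' hq' => hpos q' (List.mem_cons_of_mem _ hq')
    rw [List.foldl_cons]
    by_cases hall : q.2.all (fun i => PySem.List.pyGetD hit i false) = true
    · rw [show pvHitStep t hit q = hit from by unfold pvHitStep; rw [if_pos hall]]
      obtain ⟨hl, hg⟩ := ih hit hposr
      refine ⟨hl, ?_⟩
      intro j hj
      rw [hg j hj]
      by_cases hq : (j : Int) ∈ q.2 ∧ PySem.Str.isIn q.1 t = true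
      · have hT : hit.getD j false = true := by
          have := List.all_eq_true.mp hall _ hq.1
          simpa [PySem.List.pyGetD_natCast] using this
        rw [hT]
        simp
      · congr 1
        refine (decide_eq_decide.mpr ?_)
        constructor
        · rintro ⟨q', hq', h1, h2⟩; exact ⟨q', List.mem_cons_of_mem _ hq', h1, h2⟩
        · rintro ⟨q', hq', h1, h2⟩
          rcases List.mem_cons.mp hq' with rfl | hq''
          · exact absurd ⟨h1, h2⟩ hq
          · exact ⟨q', hq'', h1, h2⟩
    · by_cases hin : PySem.Str.isIn q.1 t = true
      · rw [show pvHitStep t hit q = pvMarkAll hit q.2 from by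
          unfold pvHitStep; rw [if_neg hall, if_pos hin]]
        obtain ⟨hml, hmg⟩ := pvMarkAll_spec q.2 hposq hit
        obtain ⟨hl, hg⟩ := ih (pvMarkAll hit q.2) hposr
        refine ⟨by rw [hl, hml], ?_⟩
        intro j hj
        rw [hg j (by rw [hml]; exact hj), hmg j hj]
        by_cases hjq : (j : Int) ∈ q.2
        · have h2 : decide (∃ q' ∈ q :: rest, (j : Int) ∈ q'.2 ∧ PySem.Str.isIn q'.1 t = true)
              = true := decide_eq_true ⟨q, List.mem_cons_self, hjq, hin⟩
          rw [h2]
          simp [hjq]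
        · simp only [hjq, decide_false, Bool.or_false]
          congr 1
          refine (decide_eq_decide.mpr ?_)
          constructor
          · rintro ⟨q', hq', h1, h2⟩; exact ⟨q', List.mem_cons_of_mem _ hq', h1, h2⟩
          · rintro ⟨q', hq', h1, h2⟩
            rcases List.mem_cons.mp hq' with rfl | hq''
            · exact absurd h1 hjq
            · exact ⟨q', hq'', h1, h2⟩
      · rw [show pvHitStep t hit q = hit from by
          unfold pvHitStep; rw [if_neg hall, if_neg hin]]
        obtain ⟨hl, hg⟩ := ih hit hposr
        refine ⟨hl, ?_⟩
        intro j hj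
        rw [hg j hj]
        congr 1
        refine (decide_eq_decide.mpr ?_)
        constructor
        · rintro ⟨q', hq', h1, h2⟩; exact ⟨q', List.mem_cons_of_mem _ hq', h1, h2⟩
        · rintro ⟨q', hq', h1, h2⟩
          rcases List.mem_cons.mp hq' with rfl | hq''
          · exact absurd h2 hin
          · exact ⟨q', hq'', h1, h2⟩

-- every index stored in the inverted index is a valid nonnegative field index
theorem pvWanted_items_pos (tf : List (String × List String)) :
    ∀ q ∈ (pvWanted tf).items, ∀ i ∈ q.2, 0 ≤ i ∧ i.toNat < tf.length := by
  rintro ⟨k, idxs⟩ hq i hi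
  have hidxs : (pvWanted tf).getD k [] = idxs :=
    PySem.Dict.getD_of_mem_items _ hq (pvWanted_nodup_keys tf) []
  rw [pvWanted_getD] at hidxs
  rw [← hidxs] at hi
  obtain ⟨p, hp, rfl⟩ := List.mem_map.mp hi
  obtain ⟨pk, px⟩ := p
  have hpm : (pk, px) ∈ pvPairs tf := (List.mem_filter.mp hp).1
  obtain ⟨j, hj, hx, -⟩ := (mem_pvPairs tf pk px).mp hpm
  omega

-- membership equivalence: field j is marked iff one of its keywords occurs
theorem pvHit_iff (t : String) (tf : List (String × List String)) (j : Nat) (hj : j < tf.length) :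
    (∃ q ∈ (pvWanted tf).items, (j : Int) ∈ q.2 ∧ PySem.Str.isIn q.1 t = true)
      ↔ tf[j].2.any (fun kw => PySem.Str.isIn (PySem.Str.lower kw) t) = true := by
  constructor
  · rintro ⟨⟨k, idxs⟩, hq, hjm, hin⟩
    have hidxs : (pvWanted tf).getD k [] = idxs :=
      PySem.Dict.getD_of_mem_items _ hq (pvWanted_nodup_keys tf) []
    rw [pvWanted_getD] at hidxs
    rw [← hidxs] at hjm
    obtain ⟨p, hp, hp2⟩ := List.mem_map.mp hjm
    obtain ⟨pk, px⟩ := p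
    obtain ⟨hpm, hpk⟩ := List.mem_filter.mp hp
    have hk : pk = k := by simpa using hpk
    have hp2' : px = (j : Int) := hp2
    have : (k, (j : Int)) ∈ pvPairs tf := by
      rwa [hk, hp2'] at hpm
    obtain ⟨j', hj', hxe, kw, hkw, rfl⟩ := (mem_pvPairs tf k (j : Int)).mp this
    have hjj : j' = j := by omega
    subst hjj
    exact List.any_eq_true.mpr ⟨kw, hkw, hin⟩
  · intro hany
    obtain ⟨kw, hkw, hin⟩ := List.any_eq_true.mp hany
    have hpair : (PySem.Str.lower kw, (j : Int)) ∈ pvPairs tf :=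
      (mem_pvPairs tf _ _).mpr ⟨j, hj, rfl, kw, hkw, rfl⟩
    have hkey : PySem.Str.lower kw ∈ (pvWanted tf).keys := by
      rw [pvWanted_keys]
      exact (PySem.Set.mem_ofList _ _).mpr (List.mem_map.mpr ⟨_, hpair, rfl⟩)
    have hmemit : (PySem.Str.lower kw, (pvWanted tf).getD (PySem.Str.lower kw) []) ∈ (pvWanted tf).items := by
      rw [PySem.Dict.items_eq_map_keys (pvWanted tf) (pvWanted_nodup_keys tf) []]
      exact List.mem_map.mpr ⟨_, hkey, rfl⟩
    refine ⟨_, hmemit, ?_, hin⟩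
    rw [pvWanted_getD]
    exact List.mem_map.mpr ⟨_, List.mem_filter.mpr ⟨hpair, by simp⟩, rfl⟩

-- zip a list with its pointwise predicate values, filter on the flag, project
theorem zip_map_filter_map {α β : Type} (xs : List α) (p : α → Bool) (g : α → β) :
    ((xs.zip (xs.map p)).filter (fun q => q.2)).map (fun q => g q.1) = (xs.filter p).map g := by
  induction xs with
  | nil => simp
  | cons x xs ih =>
    by_cases hx : p x = true
    · simp [hx, ih]
    · simp only [Bool.not_eq_true] at hx
      simp [hx, ih]

-- ===== VERDICT (by name: the statement is the Claim_ definition above) =====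
theorem is_relevant_content_py_spec : Claim_equal_is_relevant_content_py := by
  intro text_content target_fields _
  unfold Spec_is_relevant_content_py is_relevant_content_py is_relevant_content_py_alt
  set t := PySem.Str.lower text_content with ht
  set pA : String × List String → Bool :=
    fun fk => fk.2.any (fun keyword => PySem.Str.isIn (PySem.Str.lower keyword) t) with hpA
  rw [PySem.List.foldl_append_if (p := pA) (f := fun fk : String × List String => fk.1)]
  simp only [List.nil_append]
  -- the computed hit list is the pointwise predicate list
  have hpos : ∀ q ∈ (pvWanted target_fields).items, ∀ i ∈ q.2, 0 ≤ i :=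
    fun q hq i hi => (pvWanted_items_pos target_fields q hq i hi).1
  obtain ⟨hlen, hget⟩ := pvHitFold_spec t ((pvWanted target_fields).items)
    (List.replicate target_fields.length false) hpos
  have hhit : (PySem.Dict.items (pvWanted target_fields)).foldl (pvHitStep t)
      (List.replicate target_fields.length false) = target_fields.map pA := by
    apply List.ext_getElem
    · rw [hlen]; simp
    · intro j hj1 hj2
      have hjn : j < target_fields.length := by simpa using hj2
      have h1 : _ = _ := hget j (by simpa using hjn)
      rw [List.getD_eq_getElem?_getD, List.getD_eq_getElem?_getD] at h1
      rw [List.getElem?_eq_getElem hj1] at h1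
      rw [List.getElem?_eq_getElem (by simp [hjn] : j < (List.replicate target_fields.length false).length)] at h1
      simp only [Option.getD_some, List.getElem_replicate, Bool.false_or] at h1
      rw [h1, List.getElem_map]
      by_cases hc : pA target_fields[j] = true
      · rw [hc, decide_eq_true_eq]
        exact (pvHit_iff t target_fields j hjn).mpr hc
      · simp only [Bool.not_eq_true] at hc
        rw [hc, decide_eq_false_iff_not]
        intro hex
        have := (pvHit_iff t target_fields j hjn).mp hex
        rw [hpA] at hc
        simp only [this] at hc
        exact Bool.noConfusion hc
  rw [hhit, zip_map_filter_map target_fields pA (fun fk => fk.1)]
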